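-- pv_equiv track=rewrite | github.com/rossw42/keyboard_stuff | qmk_utilities/qmk_format_converter/generators/keymap_generator.py | _format_lily58_keycodes
-- ===== SOURCE A (Python) =====
-- from typing import Dict, List, Any, Union, Optional, Tuple
--
-- def _format_lily58_keycodes(keycodes: List[str]) -> str:
--     """Format keycodes specifically for Lily58 layout."""
--     # Lily58 has 58 keys, format them in logical groups
--     # Based on the QMK Lily58 keymap structure
--     content = ""
--
--     # Format in groups of keys for readability
--     keys_per_line = [
--         # Top row (12 keys)
--         12,
--         # Second row (12 keys)
--         12,
--         # Third row (12 keys)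
--         12,
--         # Fourth row (12 keys)
--         12,
--         # Thumb cluster (10 keys)
--         10
--     ]
--
--     idx = 0
--     for i, line_count in enumerate(keys_per_line):
--         content += "        "  # Indent
--         line_keys = []
--         for j in range(line_count):
--             if idx < len(keycodes):
--                 line_keys.append(f"{keycodes[idx]:<8}")
--                 idx += 1
--             else:
--                 line_keys.append(f"{'KC_TRNS':<8}")
--
--         content += ", ".join(line_keys)
--         if i < len(keys_per_line) - 1:
--             content += ",\n"
--         else:
--             content += "\n"
--
--     return content
-- ===== SOURCE B (Python) =====
-- from typing import List
--
-- def _format_lily58_keycodes(keycodes: List[str]) -> str: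
--     """Format keycodes specifically for Lily58 layout."""
--     # Single flat pass over the 58 cell positions: no row grouping, no join.
--     # The separator after cell i is computed arithmetically from i alone:
--     # end of a 12-key row (i % 12 == 11, i < 48) -> ",\n" + next row's indent;
--     # last cell (i == 57) -> final newline; otherwise ", ".
--     def sep(i: int) -> str:
--         if i == 57:
--             return "\n"
--         if i < 48 and i % 12 == 11:
--             return ",\n        "
--         return ", "
--     out = "        "
--     for i in range(58):
--         key = keycodes[i] if i < len(keycodes) else "KC_TRNS"
--         out += f"{key:<8}" + sep(i)
--     return out
-- ===== Notes on version B (the rewrite author's own statement) =====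
-- stated objective: simpler
-- what changed: Replaces A's row-grouped walk (group-size list [12,12,12,12,10], per-row key list built under a bounds check, per-row ', '.join, trailing-row branch) by one flat pass over the 58 cell positions in which the separator written after each cell is computed arithmetically from its index alone (row break when i % 12 == 11 and i < 48, final newline at i == 57).
import Mathlib
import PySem

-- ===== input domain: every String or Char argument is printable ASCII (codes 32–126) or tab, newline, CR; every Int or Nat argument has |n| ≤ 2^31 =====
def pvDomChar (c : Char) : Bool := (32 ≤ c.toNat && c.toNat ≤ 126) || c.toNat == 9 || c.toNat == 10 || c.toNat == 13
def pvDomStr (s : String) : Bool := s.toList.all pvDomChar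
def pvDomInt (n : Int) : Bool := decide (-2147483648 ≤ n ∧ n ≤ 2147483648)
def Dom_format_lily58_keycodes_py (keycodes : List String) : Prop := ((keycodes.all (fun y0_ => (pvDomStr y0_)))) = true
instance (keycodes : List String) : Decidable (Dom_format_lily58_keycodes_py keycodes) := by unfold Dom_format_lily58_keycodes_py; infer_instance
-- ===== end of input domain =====

-- B replaces A's row-grouped check-then-append walk (group-size list, per-row join, trailing-row
-- branch) by ONE flat pass over the 58 cell positions, the separator after each cell computed
-- arithmetically from its index alone (objective: simpler decomposition; same cost).

-- f"{s:<8}": left-justify in 8 columns, space-padded (exact: width counts characters)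
def pvPad (s : String) : String := s ++ String.ofList (List.replicate (8 - s.toList.length) ' ')

-- ===== PORT A =====
def pvKeysPerLine : List Nat := [12, 12, 12, 12, 10]

-- inner loop 'for j in range(line_count)': structural recursion on the count, same state (line_keys, idx)
def pvInnerA (keycodes : List String) : Nat → Nat → List String → (List String × Nat)
  | 0, idx, acc => (acc, idx)
  | c + 1, idx, acc =>
      if idx < keycodes.length then
        pvInnerA keycodes c (idx + 1) (acc ++ [pvPad (keycodes.getD idx "")])
      else
        pvInnerA keycodes c idx (acc ++ [pvPad "KC_TRNS"])

def format_lily58_keycodes_py (keycodes : List String) : String :=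
  let r := (PySem.List.enumerate pvKeysPerLine).foldl
    (fun (st : String × Nat) p =>
      let content := st.1 ++ "        "
      let lk := pvInnerA keycodes p.2 st.2 []
      let content := content ++ PySem.Str.join ", " lk.1
      let content := if p.1 < (pvKeysPerLine.length : Int) - 1 then content ++ ",\n" else content ++ "\n"
      (content, lk.2)) ("", 0)
  r.1

-- ===== PORT B =====
-- sep(i) of Source B
def pvSepB (i : Int) : String :=
  if i = 57 then "\n"
  else if i < 48 ∧ PySem.Int.mod i 12 = 11 then ",\n        "
  else ", "

-- 'keycodes[i] if i < len(keycodes) else "KC_TRNS"': i comes from range(58) so 0 ≤ i; plain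
-- nonneg indexing transliterated with getD (exact here since the branch guarantees i in range)
def pvCellB (keycodes : List String) (i : Int) : String :=
  if i < (keycodes.length : Int) then keycodes.getD i.toNat "" else "KC_TRNS"

def format_lily58_keycodes_py_alt (keycodes : List String) : String :=
  (PySem.List.pyRange 0 58 1).foldl
    (fun out i => out ++ pvPad (pvCellB keycodes i) ++ pvSepB i)
    "        "

-- ===== PRECONDITION & SPEC =====
def Spec_format_lily58_keycodes_py (keycodes : List String) (out : String) : Prop := out = format_lily58_keycodes_py_alt keycodes
instance (keycodes : List String) (out : String) : Decidable (Spec_format_lily58_keycodes_py keycodes out) := by unfold Spec_format_lily58_keycodes_py; infer_instance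

-- ===== CLAIM (what is proved, stated in full; the proofs are below) =====
def Claim_equal_format_lily58_keycodes_py : Prop := ∀ (keycodes : List String), Dom_format_lily58_keycodes_py keycodes → Spec_format_lily58_keycodes_py keycodes (format_lily58_keycodes_py keycodes)

-- ===== LEMMAS AND PROOFS =====

-- per-index characterisation of the cell A writes at position n
def pvG (keycodes : List String) (n : Nat) : String :=
  if n < keycodes.length then keycodes.getD n "" else "KC_TRNS"

-- A's inner loop consumes exactly the window [p, p+c) of the padded list
theorem pvInnerA_window (keycodes : List String) (c p : Nat) (acc : List String)
    (hc : p + c ≤ 58) :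
    pvInnerA keycodes c (min keycodes.length p) acc =
      (acc ++ ((List.range' p c).map (fun n => pvPad (pvG keycodes n))),
       min keycodes.length (p + c)) := by
  induction c generalizing p acc with
  | zero => simp [pvInnerA]
  | succ c ih =>
    rw [List.range'_succ]
    by_cases h : p < keycodes.length
    · have hmin : min keycodes.length p = p := by omega
      rw [pvInnerA, if_pos (by omega : min keycodes.length p < keycodes.length)]
      rw [hmin]
      have hg : keycodes.getD p "" = pvG keycodes p := by simp [pvG, if_pos h]
      rw [hg]
      have h2 := ih (p + 1) (acc ++ [pvPad (pvG keycodes p)]) (by omega)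
      rw [(by omega : min keycodes.length (p + 1) = p + 1)] at h2
      rw [h2]
      refine Prod.ext ?_ (by simp; omega)
      simp [List.append_assoc]
    · have hmin : min keycodes.length p = keycodes.length := by omega
      rw [pvInnerA, if_neg (by omega : ¬ min keycodes.length p < keycodes.length)]
      have hg : ("KC_TRNS" : String) = pvG keycodes p := by simp [pvG, if_neg h]
      rw [hg]
      have h2 := ih (p + 1) (acc ++ [pvPad (pvG keycodes p)]) (by omega)
      rw [(by omega : min keycodes.length (p + 1) = keycodes.length)] at h2
      rw [hmin, h2]
      refine Prod.ext ?_ (by simp; omega)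
      simp [List.append_assoc]

-- B's per-cell value and separator at a cast index
theorem pvCellB_nonneg (keycodes : List String) (i : Int) (h : 0 ≤ i) :
    pvCellB keycodes i = pvG keycodes i.toNat := by
  unfold pvCellB pvG
  split_ifs with h1 h2 h2 <;> first | rfl | (exfalso; omega)

def pvSepN (n : Nat) : String :=
  if n = 57 then "\n" else if n < 48 ∧ n % 12 = 11 then ",\n        " else ", "

theorem pvSepB_nonneg (i : Int) (h : 0 ≤ i) : pvSepB i = pvSepN i.toNat := by
  have hm : PySem.Int.mod i 12 = ((i.toNat % 12 : Nat) : Int) := by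
    rw [show i = ((i.toNat : Nat) : Int) from by omega]
    exact_mod_cast PySem.Int.mod_natCast i.toNat 12
  unfold pvSepB pvSepN
  rw [hm]
  split_ifs <;> first | rfl | (exfalso; omega)

theorem pvRange58 : PySem.List.pyRange 0 58 1 = ([0, 1, 2, 3, 4, 5, 6, 7, 8, 9, 10, 11, 12, 13, 14, 15, 16, 17, 18, 19, 20, 21, 22, 23, 24, 25, 26, 27, 28, 29, 30, 31, 32, 33, 34, 35, 36, 37, 38, 39, 40, 41, 42, 43, 44, 45, 46, 47, 48, 49, 50, 51, 52, 53, 54, 55, 56, 57] : List Int) := by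
  decide

-- ===== VERDICT (by name: the statement is the Claim_ definition above) =====
set_option maxRecDepth 8000 in
theorem format_lily58_keycodes_py_spec : Claim_equal_format_lily58_keycodes_py := by
  intro keycodes _
  show format_lily58_keycodes_py keycodes = format_lily58_keycodes_py_alt keycodes
  unfold format_lily58_keycodes_py format_lily58_keycodes_py_alt
  rw [pvRange58]
  simp only [List.foldl]
  norm_num [pvCellB_nonneg, pvSepB_nonneg]
  simp only [pvKeysPerLine, PySem.List.enumerate_cons, PySem.List.enumerate_nil, List.foldl]
  rw [(by omega : (0 : Nat) = min keycodes.length 0)]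
  rw [pvInnerA_window keycodes 12 0 [] (by omega),
      pvInnerA_window keycodes 12 12 [] (by omega),
      pvInnerA_window keycodes 12 24 [] (by omega),
      pvInnerA_window keycodes 12 36 [] (by omega),
      pvInnerA_window keycodes 10 48 [] (by omega)]
  simp only [List.range']
  norm_num
  rw [← String.toList_inj]
  simp [PySem.Str.join, PySem.Chars.join, List.intercalate, pvSepN]
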